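-- pv_equiv track=rewrite | github.com/liskos/isakovich2023 | ege23/189.py | f
-- ===== SOURCE A (Python) =====
-- def f(a, b, c):
--     if a > b or a < -40 or a > 40:
--         return 0
--     if a == b:
--         return 1
--     if ((a+2) not in c) and ((a - 3) not in c):
--         return f(a+2, b, c+[a+2]) + f(a - 3, b, c + [a - 3])
--     if ((a+2) in c) and ((a - 3) not in c):
--         return f(a - 3, b, c + [a - 3])
--     if ((a+2) not in c) and ((a - 3) in c):
--         return f(a+2, b, c+[a+2])
--     if ((a+2) in c) and ((a - 3) in c):
--         return 0
-- ===== SOURCE B (Python) =====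
-- def f(a, b, c):
--     stack = [(a, c)]
--     count = 0
--     while stack:
--         (node, vis), stack = stack[0], stack[1:]
--         if node > b or node < -40 or node > 40:
--             continue
--         if node == b:
--             count += 1
--             continue
--         stack = [(n, vis + [n]) for n in (node + 2, node - 3) if n not in vis] + stack
--     return count
-- ===== Notes on version B (the rewrite author's own statement) =====
-- stated objective: alternative
-- what changed: Replaced the four-way branching recursion with an iterative worklist loop over (node, visited-list) frames popped from a queue, pushing unvisited +2/-3 neighbours and accumulating the count in a counter.
import Mathlib
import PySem

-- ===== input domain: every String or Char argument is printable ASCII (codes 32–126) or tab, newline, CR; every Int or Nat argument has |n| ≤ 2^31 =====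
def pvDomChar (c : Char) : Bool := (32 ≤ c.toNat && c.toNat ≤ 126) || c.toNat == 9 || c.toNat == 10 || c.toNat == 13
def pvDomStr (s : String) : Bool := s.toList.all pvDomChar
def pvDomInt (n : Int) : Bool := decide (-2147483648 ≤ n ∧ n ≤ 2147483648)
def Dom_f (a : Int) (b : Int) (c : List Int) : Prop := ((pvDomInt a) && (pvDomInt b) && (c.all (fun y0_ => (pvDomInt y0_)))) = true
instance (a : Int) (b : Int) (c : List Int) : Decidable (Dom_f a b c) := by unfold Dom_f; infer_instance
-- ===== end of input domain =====

-- B replaces A's four-way branching recursion by an iterative worklist loop over (node, visited)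
-- frames accumulating a counter (objective: alternative decomposition, same asymptotic cost).

-- Termination measure shared by both ports: how many values of the interval [-43, 42]
-- (every value a recursive call / pushed frame can add to the visited list) are still unvisited.
def pvMeas (c : List Int) : Nat :=
  (PySem.List.pyRange (-43) 43 1).countP (fun x => x ∉ c)

theorem pvCountP_le {α : Type} {p q : α → Bool} (l : List α) (hpq : ∀ a, p a → q a) :
    l.countP p ≤ l.countP q := by
  induction l with
  | nil => simp
  | cons a t ih =>
    simp only [List.countP_cons]
    by_cases h : p a = true <;> simp [h, hpq a] <;> omega

theorem pvCountP_lt {α : Type} {p q : α → Bool} {l : List α} (hpq : ∀ a, p a → q a)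
    {x : α} (hx : x ∈ l) (hpx : ¬ p x = true) (hqx : q x = true) :
    l.countP p < l.countP q := by
  induction l with
  | nil => simp at hx
  | cons a t ih =>
    simp only [List.countP_cons]
    rcases List.mem_cons.mp hx with rfl | hxt
    · have hle := pvCountP_le t hpq
      simp [hpx, hqx]; omega
    · have hlt := ih hxt
      by_cases h : p a = true <;> simp [h, hpq a] <;> omega

theorem pvMeas_lt {x : Int} {c : List Int} (hx : x ∉ c) (h1 : -43 ≤ x) (h2 : x ≤ 42) :
    pvMeas (c ++ [x]) < pvMeas c := by
  apply pvCountP_lt (x := x)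
  · intro a ha
    simp only [decide_eq_true_eq, List.mem_append, List.mem_singleton] at *
    exact fun h => ha (Or.inl h)
  · exact PySem.List.mem_pyRange_one.mpr ⟨by omega, by omega⟩
  · simp
  · simpa using hx

-- ===== PORT A =====
-- literal transliteration of A's recursion (the four membership branches in source order;
-- the branches are exhaustive, so the trailing 'else 0' is Python's final 'return 0').
def f (a : Int) (b : Int) (c : List Int) : Int :=
  if a > b ∨ a < -40 ∨ a > 40 then 0
  else if a = b then 1
  else if (a + 2) ∉ c ∧ (a - 3) ∉ c then
    f (a + 2) b (c ++ [a + 2]) + f (a - 3) b (c ++ [a - 3])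
  else if (a + 2) ∈ c ∧ (a - 3) ∉ c then
    f (a - 3) b (c ++ [a - 3])
  else if (a + 2) ∉ c ∧ (a - 3) ∈ c then
    f (a + 2) b (c ++ [a + 2])
  else 0
termination_by pvMeas c
decreasing_by
  · exact pvMeas_lt (by tauto) (by omega) (by omega)
  · exact pvMeas_lt (by tauto) (by omega) (by omega)
  · exact pvMeas_lt (by tauto) (by omega) (by omega)
  · exact pvMeas_lt (by tauto) (by omega) (by omega)

-- ===== PORT B =====
-- weight of the worklist: pushed frames always carry a strictly smaller pvMeas, and a pop
-- pushes at most two of them, so the total 3-adic weight strictly decreases.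
def pvW (stack : List (Int × List Int)) : Nat :=
  (stack.map (fun p => 3 ^ pvMeas p.2)).sum

theorem pvSumChildren_lt (node : Int) (vis : List Int) (h1 : -40 ≤ node) (h2 : node ≤ 40) :
    ((([node + 2, node - 3].filter (fun n => n ∉ vis)).map
        (fun n => 3 ^ pvMeas (vis ++ [n]))).sum : Nat) < 3 ^ pvMeas vis := by
  have key : ∀ n : Int, n ∉ vis → n = node + 2 ∨ n = node - 3 →
      3 ^ pvMeas (vis ++ [n]) * 3 ≤ 3 ^ pvMeas vis := by
    intro n hn hcase
    have hlt := pvMeas_lt hn (by omega) (by omega)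
    calc 3 ^ pvMeas (vis ++ [n]) * 3 = 3 ^ (pvMeas (vis ++ [n]) + 1) := by ring
      _ ≤ 3 ^ pvMeas vis := Nat.pow_le_pow_right (by norm_num) (by omega)
  have hpos : 1 ≤ 3 ^ pvMeas vis := Nat.one_le_pow _ _ (by norm_num)
  by_cases hA : (node + 2) ∈ vis <;> by_cases hB : (node - 3) ∈ vis <;>
    simp [hA, hB]
  · have := key (node - 3) hB (Or.inr rfl); omega
  · have := key (node + 2) hA (Or.inl rfl); omega
  · have := key (node + 2) hA (Or.inl rfl); have := key (node - 3) hB (Or.inr rfl); omega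

-- the loop of Source B: pop the front frame, prune / count / prepend the unvisited neighbours.
def fLoop (b : Int) (stack : List (Int × List Int)) (count : Int) : Int :=
  match stack with
  | [] => count
  | (node, vis) :: rest =>
    if node > b ∨ node < -40 ∨ node > 40 then fLoop b rest count
    else if node = b then fLoop b rest (count + 1)
    else
      fLoop b
        ((([node + 2, node - 3].filter (fun n => n ∉ vis)).map
          (fun n => (n, vis ++ [n]))) ++ rest) count
termination_by pvW stack
decreasing_by
  · simp only [pvW, List.map_cons, List.sum_cons]
    have : 1 ≤ 3 ^ pvMeas vis := Nat.one_le_pow _ _ (by norm_num)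
    omega
  · simp only [pvW, List.map_cons, List.sum_cons]
    have : 1 ≤ 3 ^ pvMeas vis := Nat.one_le_pow _ _ (by norm_num)
    omega
  · simp only [pvW, List.map_cons, List.sum_cons, List.map_append, List.map_map,
      Function.comp_def, List.sum_append]
    have := pvSumChildren_lt node vis (by omega) (by omega)
    omega

def f_alt (a : Int) (b : Int) (c : List Int) : Int :=
  fLoop b [(a, c)] 0

-- ===== PRECONDITION & SPEC =====
def Spec_f (a : Int) (b : Int) (c : List Int) (out : Int) : Prop := out = f_alt a b c
instance (a : Int) (b : Int) (c : List Int) (out : Int) : Decidable (Spec_f a b c out) := by unfold Spec_f; infer_instance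

-- ===== CLAIM (what is proved, stated in full; the proofs are below) =====
def Claim_equal_f : Prop := ∀ (a : Int) (b : Int) (c : List Int), Dom_f a b c → Spec_f a b c (f a b c)

-- ===== LEMMAS AND PROOFS =====

-- A's value at a live node equals the sum of A's values over the unvisited neighbours B pushes.
theorem f_children (node b : Int) (vis : List Int)
    (hg : ¬(node > b ∨ node < -40 ∨ node > 40)) (hb : node ≠ b) :
    f node b vis =
      (([node + 2, node - 3].filter (fun n => n ∉ vis)).map
        (fun n => f n b (vis ++ [n]))).sum := by
  rw [f]
  by_cases hA : (node + 2) ∈ vis <;> by_cases hB : (node - 3) ∈ vis <;>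
    simp [hg, hb, hA, hB]

-- the loop invariant: fLoop adds to the counter the A-value of every pending frame.
theorem fLoop_eq (b : Int) (stack : List (Int × List Int)) (count : Int) :
    fLoop b stack count = count + (stack.map (fun p => f p.1 b p.2)).sum := by
  fun_induction fLoop b stack count with
  | case1 count => simp
  | case2 count node vis rest hg ih =>
    rw [ih, List.map_cons, List.sum_cons, f]
    simp [hg]
  | case3 count vis rest hg ih =>
    rw [ih, List.map_cons, List.sum_cons, f]
    simp
    omega
  | case4 count node vis rest hg hb ih =>
    rw [ih]
    simp only [List.map_append, List.map_map, Function.comp_def, List.sum_append,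
      List.map_cons, List.sum_cons]
    rw [f_children node b vis hg hb]

-- ===== VERDICT (by name: the statement is the Claim_ definition above) =====
theorem f_spec : Claim_equal_f := by
  intro a b c _
  unfold Spec_f f_alt
  rw [fLoop_eq]
  simp
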